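-- pv_equiv track=rewrite | github.com/kelvinblaser/EulerProject | Euler816.py | make_points
-- ===== SOURCE A (Python) =====
-- MOD = 50515093
--
-- def make_points(k: int) -> list[tuple[int, int]]:
--     s = 290797
--     points = []
--     for _ in range(k):
--         x = s
--         s = (s * s) % MOD
--         y = s
--         s = (s * s) % MOD
--         points.append((x, y))
--     return points
-- ===== SOURCE B (Python) =====
-- MOD = 50515093
--
--
-- def _states(n, s):
--     out = []
--     for _ in range(n):
--         out.append(s)
--         s = s * s % MOD
--     return out
--
--
-- def make_points(k: int) -> list[tuple[int, int]]:
--     vals = _states(2 * k, 290797)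
--     points = []
--     for i in range(0, len(vals), 2):
--         points.append((vals[i], vals[i + 1]))
--     return points
-- ===== Notes on version B (the rewrite author's own statement) =====
-- stated objective: alternative
-- what changed: B first generates a flat list of 2*k successive PRNG states in one loop, then groups consecutive states into pairs by a separate recursive chunking pass, instead of interleaving x/y assignments inside a single loop.
import Mathlib
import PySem

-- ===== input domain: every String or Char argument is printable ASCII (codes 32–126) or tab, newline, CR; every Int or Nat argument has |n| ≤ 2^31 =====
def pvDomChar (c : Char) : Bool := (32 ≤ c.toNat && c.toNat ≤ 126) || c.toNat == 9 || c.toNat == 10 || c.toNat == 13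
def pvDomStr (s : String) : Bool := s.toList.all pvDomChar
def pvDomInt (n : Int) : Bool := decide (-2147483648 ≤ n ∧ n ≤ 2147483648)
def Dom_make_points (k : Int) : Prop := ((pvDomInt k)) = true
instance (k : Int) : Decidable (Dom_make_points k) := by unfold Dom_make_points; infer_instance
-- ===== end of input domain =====

-- B first generates a flat list of 2*k PRNG states in one loop, then pairs adjacent states in a second pass; same values, different decomposition.

-- ===== PORT A =====
def make_points (k : Int) : List (Int × Int) :=
  ((PySem.List.pyRange 0 k 1).foldl
    (fun st _ =>
      let s := st.1
      let x := s
      let s := PySem.Int.mod (s * s) 50515093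
      let y := s
      let s := PySem.Int.mod (s * s) 50515093
      (s, st.2 ++ [(x, y)]))
    (290797, [])).2

-- ===== PORT B =====
-- helper _states: one loop appending each state before updating
def pvStates (n : Int) (s : Int) : List Int :=
  ((PySem.List.pyRange 0 n 1).foldl
    (fun st _ => (PySem.Int.mod (st.1 * st.1) 50515093, st.2 ++ [st.1]))
    (s, [])).2

def make_points_alt (k : Int) : List (Int × Int) :=
  let vals := pvStates (2 * k) 290797
  (PySem.List.pyRange 0 (vals.length : Int) 2).foldl
    (fun points i =>
      points ++ [(PySem.List.pyGetD vals i 0, PySem.List.pyGetD vals (i + 1) 0)])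
    []

-- ===== PRECONDITION & SPEC =====
def Spec_make_points (k : Int) (out : List (Int × Int)) : Prop := out = make_points_alt k
instance (k : Int) (out : List (Int × Int)) : Decidable (Spec_make_points k out) := by unfold Spec_make_points; infer_instance

-- ===== CLAIM (what is proved, stated in full; the proofs are below) =====
def Claim_equal_make_points : Prop := ∀ (k : Int), Dom_make_points k → Spec_make_points k (make_points k)

-- ===== LEMMAS AND PROOFS =====

-- the PRNG update and the two loop bodies, named for the proofs
def pvG (t : Int) : Int := PySem.Int.mod (t * t) 50515093

def pvStepA (st : Int × List (Int × Int)) : Int × List (Int × Int) :=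
  (pvG (pvG st.1), st.2 ++ [(st.1, pvG st.1)])

def pvStepS (st : Int × List Int) : Int × List Int :=
  (pvG st.1, st.2 ++ [st.1])

-- a fold ignoring the list elements is an iterate of the step
theorem foldl_const_iterate {α β : Type} (g : α → α) (l : List β) (init : α) :
    l.foldl (fun st _ => g st) init = g^[l.length] init := by
  induction l generalizing init with
  | nil => rfl
  | cons a t ih => simp [List.foldl, Function.iterate_succ_apply, ih]

-- a fold appending one image per element is a map
theorem foldl_append_map {α β : Type} (f : β → α) (l : List β) (init : List α) :
    l.foldl (fun acc x => acc ++ [f x]) init = init ++ l.map f := by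
  induction l generalizing init with
  | nil => simp
  | cons a t ih => simp [List.foldl, ih]

-- closed form of A's loop
theorem pvStepA_closed (n : Nat) (s : Int) :
    pvStepA^[n] (s, []) =
      (pvG^[2 * n] s, (List.range n).map (fun i => (pvG^[2 * i] s, pvG^[2 * i + 1] s))) := by
  induction n with
  | zero => simp
  | succ m ih =>
    rw [Function.iterate_succ_apply', ih]
    have h1 : 2 * (m + 1) = (2 * m + 1) + 1 := by ring
    have h2 : 2 * m + 1 = (2 * m) + 1 := rfl
    refine Prod.ext ?_ ?_
    · simp only [pvStepA, h1, Function.iterate_succ_apply']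
    · simp [pvStepA, List.range_succ, Function.iterate_succ_apply']

-- closed form of B's state-generating loop
theorem pvStepS_closed (n : Nat) (s : Int) :
    pvStepS^[n] (s, []) = (pvG^[n] s, (List.range n).map (fun i => pvG^[i] s)) := by
  induction n with
  | zero => simp
  | succ m ih =>
    rw [Function.iterate_succ_apply', ih]
    refine Prod.ext ?_ ?_
    · simp only [pvStepS, Function.iterate_succ_apply']
    · simp [pvStepS, List.range_succ]

-- ===== VERDICT (by name: the statement is the Claim_ definition above) =====
theorem make_points_spec : Claim_equal_make_points := by
  intro k _
  unfold Spec_make_points make_points make_points_alt pvStates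
  rw [show (fun (st : Int × List (Int × Int)) (_ : Int) =>
      let s := st.1
      let x := s
      let s := PySem.Int.mod (s * s) 50515093
      let y := s
      let s := PySem.Int.mod (s * s) 50515093
      (s, st.2 ++ [(x, y)])) = (fun st _ => pvStepA st) from rfl]
  rw [show (fun (st : Int × List Int) (_ : Int) =>
      (PySem.Int.mod (st.1 * st.1) 50515093, st.2 ++ [st.1])) = (fun st _ => pvStepS st) from rfl]
  rw [foldl_const_iterate, foldl_const_iterate]
  rw [PySem.List.length_pyRange_one, PySem.List.length_pyRange_one]
  have hN : (2 * k - 0).toNat = 2 * (k - 0).toNat := by omega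
  rw [hN, pvStepA_closed, pvStepS_closed]
  dsimp only
  set k' : Nat := (k - 0).toNat with hk'
  set vals : List Int := (List.range (2 * k')).map (fun i => pvG^[i] 290797) with hvals
  have hlen : vals.length = 2 * k' := by simp [hvals]
  rw [hlen]
  rw [PySem.List.pyRange_of_pos 0 ((2 * k' : Nat) : Int) (by norm_num)]
  have hcount : (if (0 : Int) < ((2 * k' : Nat) : Int) then ((((2 * k' : Nat) : Int) - 0 + 2 - 1) / 2).toNat else 0) = k' := by
    split_ifs with h <;> omega
  rw [hcount, foldl_append_map, List.map_map, List.nil_append]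
  refine List.map_congr_left ?_
  intro j hj
  rw [List.mem_range] at hj
  have e1 : (0 : Int) + 2 * (j : Int) = ((2 * j : Nat) : Int) := by push_cast; ring
  have e2 : ((2 * j : Nat) : Int) + 1 = ((2 * j + 1 : Nat) : Int) := by push_cast; ring
  simp only [Function.comp_apply, e1, e2, PySem.List.pyGetD_natCast]
  rw [PySem.List.getD_map_range _ _ _ _ (by omega), PySem.List.getD_map_range _ _ _ _ (by omega)]
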